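-- pv_equiv track=rewrite | github.com/Hemanthbommadi/GFG-potm-soluutions | 1-aug.py | countBalanced
-- ===== SOURCE A (Python) =====
-- def countBalanced(arr):
--     def isVowel(ch):
--         return ch in 'aeiou'
--
--     from collections import defaultdict
--
--     preSum = 0
--     ans = 0
--     freq = defaultdict(int)
--     freq[0] = 1  # for the empty prefix
--
--     for s in arr:
--         for ch in s:
--             if isVowel(ch):
--                 preSum += 1
--             else:
--                 preSum -= 1
--         ans += freq[preSum]
--         freq[preSum] += 1
--
--     return ans
-- ===== SOURCE B (Python) =====
-- def countBalanced(arr):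
--     # prefix balances (2*vowels - length per string), then sort and count
--     # pairs of equal values by scanning runs -- no hash map at all
--     bal = 0
--     prefixes = [0]
--     for s in arr:
--         vowels = sum(ch in 'aeiou' for ch in s)
--         bal += 2 * vowels - len(s)
--         prefixes.append(bal)
--     prefixes.sort()
--     ans = 0
--     run = 0
--     prev = None
--     for p in prefixes:
--         if p == prev:
--             ans += run
--             run += 1
--         else:
--             prev = p
--             run = 1
--     return ans
-- ===== Notes on version B (the rewrite author's own statement) =====
-- stated objective: alternative
-- what changed: B replaces A's hash-map of prefix-sum frequencies with a sort-then-scan: it builds the list of prefix balances (computed as 2*vowels-len per string instead of per-char +/-1), sorts it, and counts equal pairs by scanning runs of equal adjacent values, using no dictionary at all.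
import Mathlib
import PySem

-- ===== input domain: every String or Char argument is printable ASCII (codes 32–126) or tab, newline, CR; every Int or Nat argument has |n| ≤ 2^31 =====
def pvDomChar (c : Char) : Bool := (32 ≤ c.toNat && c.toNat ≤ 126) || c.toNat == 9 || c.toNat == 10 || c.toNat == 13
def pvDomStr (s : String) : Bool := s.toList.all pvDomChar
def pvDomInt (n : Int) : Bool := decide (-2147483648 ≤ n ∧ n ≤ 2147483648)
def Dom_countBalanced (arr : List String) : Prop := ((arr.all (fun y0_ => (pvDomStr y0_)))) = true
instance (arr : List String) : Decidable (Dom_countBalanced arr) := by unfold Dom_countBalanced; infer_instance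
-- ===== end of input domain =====

-- B replaces A's hash-map of prefix-sum frequencies with a sort-then-scan over runs of equal
-- prefix balances (computed as 2*vowels-len per string); objective: alternative algorithm.


-- ===== PORT A =====
-- ch in 'aeiou'
def cbA_isVowel (ch : Char) : Bool := "aeiou".toList.contains ch

-- A's loop body: update preSum over the chars of s, then ans += freq[preSum]; freq[preSum] += 1
def cbA_step (st : Int × Int × PySem.Dict Int Int) (s : String) : Int × Int × PySem.Dict Int Int :=
  let preSum := s.toList.foldl (fun p ch => if cbA_isVowel ch then p + 1 else p - 1) st.1
  (preSum, st.2.1 + st.2.2.getD preSum 0, st.2.2.insert preSum (st.2.2.getD preSum 0 + 1))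

def countBalanced (arr : List String) : Int :=
  -- state: (preSum, ans, freq); freq seeded with freq[0] = 1 for the empty prefix
  (arr.foldl cbA_step (0, 0, PySem.Dict.empty.insert 0 1)).2.1

-- ===== PORT B =====
-- vowels = sum(ch in 'aeiou' for ch in s)
def cbB_vowels (s : String) : Int :=
  s.toList.foldl (fun a ch => a + (if "aeiou".toList.contains ch then (1 : Int) else 0)) 0

-- the run scan: if p == prev: ans += run; run += 1 else: prev = p; run = 1
def cbB_scanStep (st : Option Int × Int × Int) (p : Int) : Option Int × Int × Int :=
  if st.1 = some p then (st.1, st.2.1 + 1, st.2.2 + st.2.1)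
  else (some p, 1, st.2.2)

def countBalanced_alt (arr : List String) : Int :=
  let prefixes := (arr.foldl (fun (st : Int × List Int) s =>
      let bal := st.1 + 2 * cbB_vowels s - (s.toList.length : Int)
      (bal, st.2 ++ [bal])) (0, ([0] : List Int))).2
  let sortedPs := PySem.List.sorted prefixes (fun x => x) false
  (sortedPs.foldl cbB_scanStep (none, 0, 0)).2.2

-- ===== PRECONDITION & SPEC =====
def Spec_countBalanced (arr : List String) (out : Int) : Prop := out = countBalanced_alt arr
instance (arr : List String) (out : Int) : Decidable (Spec_countBalanced arr out) := by unfold Spec_countBalanced; infer_instance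

-- ===== CLAIM (what is proved, stated in full; the proofs are below) =====
def Claim_equal_countBalanced : Prop := ∀ (arr : List String), Dom_countBalanced arr → Spec_countBalanced arr (countBalanced arr)

-- ===== LEMMAS AND PROOFS =====

-- pair count of a group of size c
def pvG (c : Int) : Int := PySem.Int.floordiv (c * (c - 1)) 2

-- A's incremental counting step over a stream of prefix values
def pvIncStep (st : PySem.Dict Int Int × Int) (v : Int) : PySem.Dict Int Int × Int :=
  (st.1.insert v (st.1.getD v 0 + 1), st.2 + st.1.getD v 0)

-- the balance after one string, starting from p
def pvBal (p : Int) (s : String) : Int := p + 2 * cbB_vowels s - (s.toList.length : Int)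

-- the successive balances after each string, starting from p
def pvPrefVals (p : Int) : List String → List Int
  | [] => []
  | s :: t => pvBal p s :: pvPrefVals (pvBal p s) t

-- the sum fold is a shift of its accumulator
lemma pv_sum_shift (l : List Char) (a : Int) :
    l.foldl (fun a ch => a + (if "aeiou".toList.contains ch then (1 : Int) else 0)) a
      = a + l.foldl (fun a ch => a + (if "aeiou".toList.contains ch then (1 : Int) else 0)) 0 := by
  induction l generalizing a with
  | nil => simp
  | cons c t ih =>
    rw [List.foldl_cons, List.foldl_cons, ih, ih (0 + _)]
    ring

-- A's inner char loop computes pvBal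
lemma pv_bal_eq (s : String) (p : Int) :
    s.toList.foldl (fun p ch => if cbA_isVowel ch then p + 1 else p - 1) p = pvBal p s := by
  unfold pvBal cbB_vowels cbA_isVowel
  suffices h : ∀ (l : List Char) (p : Int),
      l.foldl (fun p ch => if "aeiou".toList.contains ch then p + 1 else p - 1) p
        = p + 2 * (l.foldl (fun a ch => a + (if "aeiou".toList.contains ch then (1 : Int) else 0)) 0)
          - (l.length : Int) by
    exact h s.toList p
  intro l
  induction l with
  | nil => intro p; simp
  | cons c t ih =>
    intro p
    rw [List.foldl_cons, List.foldl_cons, pv_sum_shift]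
    by_cases h : "aeiou".toList.contains c = true
    · rw [if_pos h, if_pos h, ih]
      push_cast [List.length_cons]
      ring
    · rw [if_neg h, if_neg h, ih]
      push_cast [List.length_cons]
      ring

lemma pv_step_eq (p a : Int) (d : PySem.Dict Int Int) (s : String) :
    cbA_step (p, a, d) s
      = (pvBal p s, a + d.getD (pvBal p s) 0,
         d.insert (pvBal p s) (d.getD (pvBal p s) 0 + 1)) := by
  simp [cbA_step, pv_bal_eq]

-- A's loop equals the incremental fold over the prefix values
lemma pv_A_fold (arr : List String) (p a : Int) (d : PySem.Dict Int Int) :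
    (arr.foldl cbA_step (p, a, d)).2.1 = ((pvPrefVals p arr).foldl pvIncStep (d, a)).2 := by
  induction arr generalizing p a d with
  | nil => simp [pvPrefVals]
  | cons s t ih =>
    rw [List.foldl_cons, pv_step_eq, ih]
    simp [pvPrefVals, pvIncStep]

-- B's first loop builds acc ++ prefix values
lemma pv_B_fold (arr : List String) (p : Int) (acc : List Int) :
    (arr.foldl (fun (st : Int × List Int) s =>
      (pvBal st.1 s, st.2 ++ [pvBal st.1 s])) (p, acc)).2
    = acc ++ pvPrefVals p arr := by
  induction arr generalizing p acc with
  | nil => simp [pvPrefVals]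
  | cons s t ih => simp [pvPrefVals, ih]

-- the dict component of the incremental fold is the counter loop
lemma pv_inc_fst (vs : List Int) (d : PySem.Dict Int Int) (a : Int) :
    (vs.foldl pvIncStep (d, a)).1 = vs.foldl (fun d x => d.insert x (d.getD x 0 + 1)) d := by
  induction vs generalizing d a with
  | nil => rfl
  | cons v t ih => simp [pvIncStep, ih]

-- pvG successive difference
lemma pv_G_step (c : Int) : pvG (c + 1) = pvG c + c := by
  unfold pvG
  rw [PySem.Int.floordiv_eq_ediv_of_pos (by norm_num), PySem.Int.floordiv_eq_ediv_of_pos (by norm_num)]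
  have h : (c + 1) * (c + 1 - 1) = c * (c - 1) + c * 2 := by ring
  rw [h, Int.add_mul_ediv_right _ _ (by norm_num)]

-- update a sum over a nodup list at one element
lemma pv_sum_update (l : List Int) (hnd : l.Nodup) (v : Int) (hv : v ∈ l)
    (f f' : Int → Int) (hagree : ∀ k ∈ l, k ≠ v → f' k = f k) :
    (l.map f').sum = (l.map f).sum + (f' v - f v) := by
  induction l with
  | nil => simp at hv
  | cons x t ih =>
    rcases List.nodup_cons.mp hnd with ⟨hx, hnt⟩
    rcases List.mem_cons.mp hv with h | h
    · subst h
      have : t.map f' = t.map f := List.map_congr_left (fun k hk => hagree k (List.mem_cons_of_mem _ hk) (fun he => hx (he ▸ hk)))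
      simp [this]; ring
    · have hxv : x ≠ v := fun he => hx (he ▸ h)
      rw [List.map_cons, List.map_cons, List.sum_cons, List.sum_cons,
        hagree x (List.mem_cons_self) hxv,
        ih hnt h (fun k hk hne => hagree k (List.mem_cons_of_mem _ hk) hne)]
      ring

-- the group-size pair sum, indexed over distinct values
def pvS (vs : List Int) : Int :=
  ((PySem.Set.ofList vs).map (fun k => pvG ((vs.count k : Nat) : Int))).sum

lemma pv_S_append (vs : List Int) (v : Int) :
    pvS (vs ++ [v]) = pvS vs + vs.count v := by
  unfold pvS
  rw [PySem.Set.ofList_append_singleton]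
  by_cases hv : v ∈ vs
  · have hmem : v ∈ PySem.Set.ofList vs := (PySem.Set.mem_ofList vs v).mpr hv
    rw [PySem.Set.add_of_mem hmem]
    rw [pv_sum_update (PySem.Set.ofList vs) (PySem.Set.nodup_ofList vs) v hmem
      (fun k => pvG ((vs.count k : Nat) : Int))
      (fun k => pvG (((vs ++ [v]).count k : Nat) : Int))
      (by
        intro k _ hk
        have : (vs ++ [v]).count k = vs.count k := by
          simp [List.count_append, Ne.symm hk]
        simp only [this])]
    have hc : ((vs ++ [v]).count v : Nat) = vs.count v + 1 := by
      simp [List.count_append]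
    rw [hc]
    push_cast
    rw [pv_G_step]
    ring
  · have hmem : v ∉ PySem.Set.ofList vs := fun h => hv ((PySem.Set.mem_ofList vs v).mp h)
    rw [PySem.Set.add_of_not_mem hmem]
    have h0 : vs.count v = 0 := List.count_eq_zero.mpr hv
    have hc : ((vs ++ [v]).count v : Nat) = 1 := by simp [List.count_append, h0]
    have hmap : (PySem.Set.ofList vs).map (fun k => pvG (((vs ++ [v]).count k : Nat) : Int))
        = (PySem.Set.ofList vs).map (fun k => pvG ((vs.count k : Nat) : Int)) := by
      apply List.map_congr_left
      intro k hk
      have hkv : k ≠ v := fun he => hv (he ▸ (PySem.Set.mem_ofList vs k).mp hk)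
      have : (vs ++ [v]).count k = vs.count k := by
        simp [List.count_append, Ne.symm hkv]
      simp only [this]
    rw [List.map_append, hmap]
    simp [pvG, h0]

-- pvS only depends on the multiset of values
lemma pv_S_perm (vs ws : List Int) (h : vs.Perm ws) : pvS vs = pvS ws := by
  unfold pvS
  have hf : (fun k => pvG ((vs.count k : Nat) : Int)) = (fun k => pvG ((ws.count k : Nat) : Int)) :=
    funext (fun k => by rw [h.count_eq])
  have hset : (PySem.Set.ofList vs).Perm (PySem.Set.ofList ws) :=
    (List.perm_ext_iff_of_nodup (PySem.Set.nodup_ofList vs) (PySem.Set.nodup_ofList ws)).mpr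
      (fun a => by rw [PySem.Set.mem_ofList, PySem.Set.mem_ofList, h.mem_iff])
  rw [hf]
  exact (hset.map _).sum_eq

-- A's incremental fold computes the pair sum
lemma pv_inc_eq_S (vs : List Int) :
    (vs.foldl pvIncStep (PySem.Dict.empty, 0)).2 = pvS vs := by
  induction vs using List.reverseRecOn with
  | nil => simp [pvS, PySem.Set.ofList_nil]
  | append_singleton t v ih =>
    rw [List.foldl_append, List.foldl_cons, List.foldl_nil]
    have hstep : ∀ (st : PySem.Dict Int Int × Int) (v : Int),
        (pvIncStep st v).2 = st.2 + st.1.getD v 0 := fun _ _ => rfl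
    rw [hstep, pv_inc_fst, PySem.Dict.getD_foldl_insert_add_one, PySem.Dict.getD_empty,
      pv_S_append, ih]
    ring

-- B's run scan over a sorted remainder computes the pair sum
lemma pv_scan_sorted (rest : List Int) (p run ans : Int) (done : List Int)
    (hrest : rest.Pairwise (· ≤ ·)) (hge : ∀ r ∈ rest, p ≤ r)
    (hdone : ∀ x ∈ done, x ≤ p) (hrun : run = ((done.count p : Nat) : Int))
    (hans : ans = pvS done) :
    (rest.foldl cbB_scanStep (some p, run, ans)).2.2 = pvS (done ++ rest) := by
  induction rest generalizing p run ans done with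
  | nil => simpa using hans
  | cons r t ih =>
    rcases List.pairwise_cons.mp hrest with ⟨hrt, ht⟩
    have hpr : p ≤ r := hge r (List.mem_cons_self)
    rw [List.foldl_cons]
    by_cases hpe : p = r
    · subst hpe
      have hstep : cbB_scanStep (some p, run, ans) p = (some p, run + 1, ans + run) := by
        simp [cbB_scanStep]
      rw [hstep, show (done ++ p :: t) = (done ++ [p]) ++ t by simp]
      exact ih p (run + 1) (ans + run) (done ++ [p]) ht
        (fun e he => hrt e he)
        (by intro x hx
            rcases List.mem_append.mp hx with h | h
            · exact hdone x h
            · simp at h; omega)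
        (by rw [hrun]; simp [List.count_append])
        (by rw [hans, pv_S_append, hrun])
    · have hlt : p < r := lt_of_le_of_ne hpr hpe
      have hstep : cbB_scanStep (some p, run, ans) r = (some r, 1, ans) := by
        simp [cbB_scanStep, hpe]
      have hnot : r ∉ done := fun h => absurd (hdone r h) (not_le.mpr hlt)
      rw [hstep, show (done ++ r :: t) = (done ++ [r]) ++ t by simp]
      exact ih r 1 ans (done ++ [r]) ht
        (fun e he => hrt e he)
        (by intro x hx
            rcases List.mem_append.mp hx with h | h
            · exact le_of_lt (lt_of_le_of_lt (hdone x h) hlt)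
            · simp at h; omega)
        (by simp [List.count_append, List.count_eq_zero.mpr hnot])
        (by rw [hans, pv_S_append, List.count_eq_zero.mpr hnot]; simp)

-- the full scan of any sorted list computes the pair sum
lemma pv_scan_full (l : List Int) (hl : l.Pairwise (· ≤ ·)) :
    (l.foldl cbB_scanStep (none, 0, 0)).2.2 = pvS l := by
  cases l with
  | nil => simp [pvS, PySem.Set.ofList_nil]
  | cons h t =>
    rcases List.pairwise_cons.mp hl with ⟨hht, ht⟩
    rw [List.foldl_cons, show cbB_scanStep (none, 0, 0) h = (some h, 1, 0) by simp [cbB_scanStep],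
      show (h :: t) = [h] ++ t by rfl]
    exact pv_scan_sorted t h 1 0 [h] ht hht
      (by intro x hx; simp at hx; omega)
      (by simp)
      (by simp [pvS, PySem.Set.ofList, pvG, PySem.Int.floordiv])

-- ===== VERDICT (by name: the statement is the Claim_ definition above) =====
theorem countBalanced_spec : Claim_equal_countBalanced := by
  intro arr _
  unfold Spec_countBalanced countBalanced countBalanced_alt
  simp only []
  rw [pv_A_fold]
  have hB : (arr.foldl (fun (st : Int × List Int) s =>
      let bal := st.1 + 2 * cbB_vowels s - (s.toList.length : Int)
      (bal, st.2 ++ [bal])) (0, ([0] : List Int))).2 = [0] ++ pvPrefVals 0 arr := pv_B_fold arr 0 [0]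
  rw [hB, pv_scan_full _ (by
      have := PySem.List.sorted_pairwise ([0] ++ pvPrefVals 0 arr) (fun x => x)
      simpa using this),
    pv_S_perm _ _ (PySem.List.sorted_perm ([0] ++ pvPrefVals 0 arr) (fun x => x) false)]
  have h0 : ((0 : Int) :: pvPrefVals 0 arr).foldl pvIncStep (PySem.Dict.empty, 0)
      = (pvPrefVals 0 arr).foldl pvIncStep (PySem.Dict.empty.insert 0 1, 0) := by
    simp [pvIncStep, PySem.Dict.getD_empty]
  rw [show ([0] ++ pvPrefVals 0 arr : List Int) = 0 :: pvPrefVals 0 arr from rfl,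
    ← pv_inc_eq_S, h0]
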